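-- pv_equiv track=rewrite | github.com/mikeparcewski/wicked-garden | scripts/patch/generators/typescript_generator.py | _find_body
-- ===== SOURCE A (Python) =====
-- from typing import Any, Dict, List, Optional, Set
--
-- def _find_body(lines: List[str], symbol: Dict[str, Any]) -> tuple:
--     """Find the start and end of the class/interface body."""
--     symbol_name = symbol.get("name", "")
--     start = -1
--     end = -1
--     brace_count = 0
--
--     for i, line in enumerate(lines):
--         if start < 0:
--             # Look for class/interface/type declaration
--             if (f"class {symbol_name}" in line or
--                 f"interface {symbol_name}" in line or
--                 f"type {symbol_name}" in line):
--                 start = i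
--                 brace_count = line.count("{") - line.count("}")
--
--         elif start >= 0:
--             brace_count += line.count("{") - line.count("}")
--             if brace_count <= 0:
--                 end = i
--                 break
--
--     return start, end
-- ===== SOURCE B (Python) =====
-- def _find_body(lines, symbol):
--     """Find the start and end of the class/interface body via a brace prefix-sum table."""
--     name = symbol.get("name", "")
--     needles = (f"class {name}", f"interface {name}", f"type {name}")
--     prefix = [0]  # prefix[k] = net brace depth after the first k lines
--     for line in lines:
--         prefix.append(prefix[-1] + line.count("{") - line.count("}"))
--     start = -1
--     for i, line in enumerate(lines):
--         if any(n in line for n in needles):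
--             start = i
--             break
--     if start < 0:
--         return -1, -1
--     for i in range(start + 1, len(lines)):
--         if prefix[i + 1] - prefix[start] <= 0:
--             return start, i
--     return start, -1
-- ===== Notes on version B (the rewrite author's own statement) =====
-- stated objective: alternative
-- what changed: Replaced A's single flag-driven scan carrying a running brace_count state machine by a precomputed brace prefix-sum table: the start line is found by a plain search and the end line is the first index i > start with prefix[i+1] - prefix[start] <= 0.
import Mathlib
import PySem

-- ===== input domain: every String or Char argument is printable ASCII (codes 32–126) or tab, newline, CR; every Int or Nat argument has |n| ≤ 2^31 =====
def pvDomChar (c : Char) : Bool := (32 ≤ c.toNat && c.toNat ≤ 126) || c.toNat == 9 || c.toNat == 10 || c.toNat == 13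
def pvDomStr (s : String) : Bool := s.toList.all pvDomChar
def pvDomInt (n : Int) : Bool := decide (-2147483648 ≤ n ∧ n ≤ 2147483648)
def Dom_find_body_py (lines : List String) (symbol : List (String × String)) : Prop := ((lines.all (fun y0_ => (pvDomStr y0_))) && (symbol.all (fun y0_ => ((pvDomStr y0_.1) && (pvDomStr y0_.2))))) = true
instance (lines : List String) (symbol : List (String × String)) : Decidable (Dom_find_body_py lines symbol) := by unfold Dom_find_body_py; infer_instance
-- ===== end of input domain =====

-- B replaces A's single flag-driven scan (running start/brace_count state machine) by a
-- precomputed brace pfx-sum table: the end line is the first index i > start with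
-- pfx[i+1] - pfx[start] <= 0; objective: alternative (different data structure).

-- shared helpers: the f-string needles and the brace delta of one line
def pvNeedleCls (name : String) : String := String.ofList ("class ".toList ++ name.toList)
def pvNeedleIfc (name : String) : String := String.ofList ("interface ".toList ++ name.toList)
def pvNeedleTyp (name : String) : String := String.ofList ("type ".toList ++ name.toList)
def pvDelta (line : String) : Int :=
  (PySem.Str.count line "{" : Int) - (PySem.Str.count line "}" : Int)

-- ===== PORT A =====
-- A's single loop: state (start, brace_count), branch on start < 0; returns on break or at end
def pvGoA (name : String) : List String → Nat → Int → Int → Int × Int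
  | [], _, start, _ => (start, -1)
  | line :: rest, i, start, bc =>
    if start < 0 then
      if PySem.Str.isIn (pvNeedleCls name) line ||
         PySem.Str.isIn (pvNeedleIfc name) line ||
         PySem.Str.isIn (pvNeedleTyp name) line then
        pvGoA name rest (i+1) (i : Int) (pvDelta line)
      else
        pvGoA name rest (i+1) start bc
    else
      let bc' := bc + pvDelta line
      if bc' ≤ 0 then (start, (i : Int)) else pvGoA name rest (i+1) start bc'

def find_body_py (lines : List String) (symbol : List (String × String)) : Int × Int :=
  pvGoA ((PySem.Dict.mk symbol).getD "name" "") lines 0 (-1) 0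

-- ===== PORT B =====
-- B's pfx table: pfx = [0]; for line in lines: pfx.append(pfx[-1] + delta(line))
def pvPrefixLoop : List String → List Int → List Int
  | [], acc => acc
  | line :: tl, acc => pvPrefixLoop tl (acc ++ [PySem.List.pyGetD acc (-1) 0 + pvDelta line])

-- B's start search: first i whose line contains a needle ('any' over the tuple), else -1
def pvStartB (name : String) : List String → Nat → Int
  | [], _ => -1
  | line :: tl, i =>
    if [pvNeedleCls name, pvNeedleIfc name, pvNeedleTyp name].any
         (fun n => PySem.Str.isIn n line) then (i : Int)
    else pvStartB name tl (i+1)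

-- B's end search: first i in range(start+1, len) with pfx[i+1] - pfx[start] <= 0
def pvEndLoop (pfx : List Int) (p0 : Int) : List Int → Int
  | [] => -1
  | i :: tl =>
    if PySem.List.pyGetD pfx (i + 1) 0 - p0 ≤ 0 then i else pvEndLoop pfx p0 tl

def find_body_py_alt (lines : List String) (symbol : List (String × String)) : Int × Int :=
  let name := (PySem.Dict.mk symbol).getD "name" ""
  let pfx := pvPrefixLoop lines [0]
  let start := pvStartB name lines 0
  if start < 0 then (-1, -1)
  else (start, pvEndLoop pfx (PySem.List.pyGetD pfx start 0)
          (PySem.List.pyRange (start + 1) (lines.length : Int) 1))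

-- ===== PRECONDITION & SPEC =====
def Spec_find_body_py (lines : List String) (symbol : List (String × String)) (out : Int × Int) : Prop := out = find_body_py_alt lines symbol
instance (lines : List String) (symbol : List (String × String)) (out : Int × Int) : Decidable (Spec_find_body_py lines symbol out) := by unfold Spec_find_body_py; infer_instance

-- ===== CLAIM (what is proved, stated in full; the proofs are below) =====
def Claim_equal_find_body_py : Prop := ∀ (lines : List String) (symbol : List (String × String)), Dom_find_body_py lines symbol → Spec_find_body_py lines symbol (find_body_py lines symbol)

-- ===== LEMMAS AND PROOFS =====

-- ideal pfx-sum tail: pvG x ls = depths after each further line, starting from depth x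
def pvG (x : Int) : List String → List Int
  | [] => []
  | line :: tl => (x + pvDelta line) :: pvG (x + pvDelta line) tl

theorem pvPrefixLoop_eq : ∀ (ls : List String) (acc : List Int) (x : Int),
    PySem.List.pyGetD acc (-1) 0 = x → pvPrefixLoop ls acc = acc ++ pvG x ls := by
  intro ls
  induction ls with
  | nil => intro acc x _; simp [pvPrefixLoop, pvG]
  | cons line tl ih =>
    intro acc x hx
    simp only [pvPrefixLoop, pvG, hx]
    rw [ih (acc ++ [x + pvDelta line]) (x + pvDelta line)
          (PySem.List.pyGetD_neg_one_append_singleton acc _ 0)]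
    simp

theorem pvG_getD : ∀ (ls : List String) (x : Int) (k : Nat), k < ls.length →
    (pvG x ls).getD k 0 = x + ((ls.take (k+1)).map pvDelta).sum := by
  intro ls
  induction ls with
  | nil => intro x k h; simp at h
  | cons line tl ih =>
    intro x k h
    cases k with
    | zero => simp [pvG]
    | succ k =>
      simp only [pvG, List.getD_cons_succ, List.take_succ_cons, List.map_cons, List.sum_cons]
      rw [ih (x + pvDelta line) k (by simpa using h)]
      ring

theorem pvPrefix_getD (ls : List String) (k : Nat) (h : k ≤ ls.length) :
    (pvPrefixLoop ls [0]).getD k 0 = ((ls.take k).map pvDelta).sum := by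
  rw [pvPrefixLoop_eq ls [0] 0 (by decide)]
  cases k with
  | zero => simp
  | succ k =>
    have : ([0] ++ pvG 0 ls).getD (k+1) 0 = (pvG 0 ls).getD k 0 := by simp
    rw [this, pvG_getD ls 0 k (by omega)]
    ring

-- once A has found start, its running brace count equals the pfx-table difference,
-- so its scan is B's indexed end search
theorem pvScan_eq (name : String) (pfx : List Int) (p0 : Int) :
    ∀ (rest : List String) (i s : Nat) (bc : Int),
      (∀ k, k < rest.length →
          pfx.getD (i + k + 1) 0 - p0 = bc + ((rest.take (k+1)).map pvDelta).sum) →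
      pvGoA name rest i (s : Int) bc =
        ((s : Int), pvEndLoop pfx p0
            (PySem.List.pyRange (i : Int) ((i + rest.length : Nat) : Int) 1)) := by
  intro rest
  induction rest with
  | nil =>
    intro i s bc _
    rw [PySem.List.pyRange_one_eq_nil (by simp)]
    simp [pvGoA, pvEndLoop]
  | cons line tl ih =>
    intro i s bc hyp
    have hns : ¬ ((s : Int) < 0) := by omega
    have hlt : (i : Int) < ((i + (line :: tl).length : Nat) : Int) := by
      simp only [List.length_cons]; omega
    rw [PySem.List.pyRange_one_cons hlt]
    simp only [pvGoA, if_neg hns, pvEndLoop]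
    have h0 := hyp 0 (by simp)
    simp only [List.take_succ_cons, List.take_zero, List.map_cons, List.map_nil,
      List.sum_cons, List.sum_nil, add_zero] at h0
    have hcast : ((i : Int) + 1) = ((i + 1 : Nat) : Int) := by push_cast; ring
    have hcond : PySem.List.pyGetD pfx ((i : Int) + 1) 0 - p0 = bc + pvDelta line := by
      rw [hcast, PySem.List.pyGetD_natCast]
      omega
    by_cases hb : bc + pvDelta line ≤ 0
    · rw [if_pos hb, if_pos (by omega)]
    · rw [if_neg hb, if_neg (by omega)]
      have hend : ((i + (line :: tl).length : Nat) : Int) = (((i + 1) + tl.length : Nat) : Int) := by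
        push_cast; simp; ring
      rw [hcast, hend]
      refine ih (i+1) s (bc + pvDelta line) ?_
      intro k hk
      have h1 := hyp (k+1) (by simp; omega)
      have hidx : i + (k+1) + 1 = (i+1) + k + 1 := by omega
      rw [hidx] at h1
      simp only [List.take_succ_cons, List.map_cons, List.sum_cons] at h1
      omega

-- while start = -1, A's loop is B's start search, handing over to the end search
theorem pvSearch_eq (name : String) (pfx : List Int) :
    ∀ (ls : List String) (i : Nat) (c : Int),
      (∀ k, k ≤ ls.length → pfx.getD (i + k) 0 = c + ((ls.take k).map pvDelta).sum) →
      pvGoA name ls i (-1) 0 =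
        (let start := pvStartB name ls i;
         if start < 0 then (-1, -1)
         else (start, pvEndLoop pfx (PySem.List.pyGetD pfx start 0)
                 (PySem.List.pyRange (start + 1) ((i + ls.length : Nat) : Int) 1))) := by
  intro ls
  induction ls with
  | nil => intro i c _; simp [pvGoA, pvStartB]
  | cons line tl ih =>
    intro i c hyp
    simp only [pvGoA, pvStartB, List.any_cons, List.any_nil, Bool.or_false, Bool.or_assoc]
    by_cases hf : (PySem.Str.isIn (pvNeedleCls name) line ||
        (PySem.Str.isIn (pvNeedleIfc name) line || PySem.Str.isIn (pvNeedleTyp name) line)) = true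
    · rw [if_pos hf, if_pos hf]
      have hns : ¬ ((i : Int) < 0) := by omega
      rw [if_neg hns]
      have hp0 : PySem.List.pyGetD pfx (i : Int) 0 = pfx.getD i 0 :=
        PySem.List.pyGetD_natCast pfx i 0
      have hcast : ((i : Int) + 1) = ((i + 1 : Nat) : Int) := by push_cast; ring
      have hend : ((i + (line :: tl).length : Nat) : Int) = (((i + 1) + tl.length : Nat) : Int) := by
        push_cast; simp; ring
      rw [hp0, hcast, hend]
      refine pvScan_eq name pfx (pfx.getD i 0) tl (i+1) i (pvDelta line) ?_
      intro k hk
      have h1 := hyp (k+2) (by simp; omega)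
      have h0 := hyp 0 (by omega)
      simp only [List.take_succ_cons, List.map_cons, List.sum_cons] at h1
      simp only [List.take_zero, List.map_nil, List.sum_nil, add_zero] at h0
      have hidx : i + (k+2) = (i+1) + k + 1 := by omega
      rw [hidx] at h1
      omega
    · rw [if_neg hf, if_neg hf]
      have hend : ((i + (line :: tl).length : Nat) : Int) = (((i + 1) + tl.length : Nat) : Int) := by
        push_cast; simp; ring
      rw [hend]
      refine ih (i+1) (c + pvDelta line) ?_
      intro k hk
      have h1 := hyp (k+1) (by simp; omega)
      simp only [List.take_succ_cons, List.map_cons, List.sum_cons] at h1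
      have hidx : i + (k+1) = (i+1) + k := by omega
      rw [hidx] at h1
      omega

-- ===== VERDICT (by name: the statement is the Claim_ definition above) =====
theorem find_body_py_spec : Claim_equal_find_body_py := by
  intro lines symbol _
  unfold Spec_find_body_py find_body_py find_body_py_alt
  have h := pvSearch_eq ((PySem.Dict.mk symbol).getD "name" "") (pvPrefixLoop lines [0])
      lines 0 0 ?_
  · simpa using h
  · intro k hk
    simpa using pvPrefix_getD lines k hk
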